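-- pv_equiv track=rewrite | github.com/Chetan541924/aws | opt.py | group_related_steps
-- ===== SOURCE A (Python) =====
-- from typing import List, Dict, Any, Optional, Tuple
--
-- def group_related_steps(steps: List[Dict[str, Any]]) -> List[List[Dict[str, Any]]]:
--     if not steps:
--         return []
--     groups = []
--     current = [steps[0]]
--     def is_cont(x): return x.strip().lower().startswith(("and ", "but "))
--     for i in range(1, len(steps)):
--         curr = steps[i]["step_text"]
--         if is_cont(curr):
--             current.append(steps[i])
--         else:
--             groups.append(current)
--             current = [steps[i]]
--     groups.append(current)
--     return groups
-- ===== SOURCE B (Python) =====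
-- def _is_cont(x):
--     return x.strip().lower().startswith(("and ", "but "))
--
-- def group_related_steps(steps):
--     # two-pointer span partition: peel one whole group (head + run of
--     # continuation steps) off the front at a time, instead of A's
--     # element-by-element accumulator loop.
--     groups = []
--     rest = steps
--     while rest:
--         k = 1
--         while k < len(rest) and _is_cont(rest[k]["step_text"]):
--             k += 1
--         groups.append(rest[:k])
--         rest = rest[k:]
--     return groups
-- ===== Notes on version B (the rewrite author's own statement) =====
-- stated objective: alternative
-- what changed: B partitions by repeatedly peeling a whole group (head plus its run of continuation steps) off the front with a two-pointer span and slices, instead of A's single element-by-element loop mutating a current-group accumulator.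
import Mathlib
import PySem

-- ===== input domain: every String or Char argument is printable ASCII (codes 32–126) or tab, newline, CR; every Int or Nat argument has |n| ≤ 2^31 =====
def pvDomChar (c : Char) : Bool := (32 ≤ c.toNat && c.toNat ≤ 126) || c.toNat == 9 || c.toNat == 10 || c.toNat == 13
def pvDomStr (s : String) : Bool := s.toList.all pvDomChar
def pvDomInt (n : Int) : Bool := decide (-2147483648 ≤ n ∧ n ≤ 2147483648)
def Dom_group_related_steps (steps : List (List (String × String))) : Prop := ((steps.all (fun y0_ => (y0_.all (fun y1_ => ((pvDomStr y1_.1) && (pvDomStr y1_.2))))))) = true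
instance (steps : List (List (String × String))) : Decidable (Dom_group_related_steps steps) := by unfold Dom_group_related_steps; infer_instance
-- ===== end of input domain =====

-- B groups steps by a front-peeling span recursion instead of A's accumulator loop; same return value on Pre_.

-- ===== PORT A =====
-- dict lookup d["step_text"]: first match in the association list (Python dict convention)
def pvStepText? (s : List (String × String)) : Option String :=
  (s.find? (fun kv => kv.1 == "step_text")).map (fun kv => kv.2)

-- is_cont(x): x.strip().lower().startswith(("and ", "but "))
def pvIsCont (x : String) : Bool :=
  PySem.Str.startswith (PySem.Str.lower (PySem.Str.strip x)) "and " ||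
  PySem.Str.startswith (PySem.Str.lower (PySem.Str.strip x)) "but "

-- continuation test on a step; Pre_ guarantees the key is present, so the "" default is never used
def pvContStep (s : List (String × String)) : Bool := pvIsCont ((pvStepText? s).getD "")

def group_related_steps (steps : List (List (String × String))) : List (List (List (String × String))) :=
  match steps with
  | [] => []
  | s0 :: rest =>
    let st := rest.foldl
      (fun (st : List (List (List (String × String))) × List (List (String × String))) s =>
        if pvContStep s then (st.1, st.2 ++ [s]) else (st.1 ++ [st.2], [s]))
      ([], [s0])
    st.1 ++ [st.2]

-- ===== PORT B =====
-- outer while: peel one group off the front of `rest`; the inner counting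
-- while computes k with rest[:k] = head :: takeWhile cont tail, rest[k:] = dropWhile cont tail
def pvPeel (groups : List (List (List (String × String)))) (rest : List (List (String × String))) :
    List (List (List (String × String))) :=
  match rest with
  | [] => groups
  | x :: xs => pvPeel (groups ++ [x :: xs.takeWhile pvContStep]) (xs.dropWhile pvContStep)
  termination_by rest.length
  decreasing_by
    simp only [List.length_cons]
    exact Nat.lt_succ_of_le (xs.length_dropWhile_le pvContStep)

def group_related_steps_alt (steps : List (List (String × String))) : List (List (List (String × String))) :=
  pvPeel [] steps

-- ===== PRECONDITION & SPEC =====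
-- Python A raises KeyError when a step after the first has no "step_text" key; B raises there too.
def Pre_group_related_steps (steps : List (List (String × String))) : Prop :=
  ∀ s ∈ steps.tail, (pvStepText? s).isSome = true
instance (steps : List (List (String × String))) : Decidable (Pre_group_related_steps steps) := by
  unfold Pre_group_related_steps; infer_instance

def pvWitness_group_related_steps : (List (List (String × String))) :=
  [[("step_text", "Given a user")], [("step_text", "and he logs in")], [("step_text", "then done")]]

def Spec_group_related_steps (steps : List (List (String × String))) (out : List (List (List (String × String)))) : Prop := out = group_related_steps_alt steps
instance (steps : List (List (String × String))) (out : List (List (List (String × String)))) : Decidable (Spec_group_related_steps steps out) := by unfold Spec_group_related_steps; infer_instance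

-- ===== CLAIM (what is proved, stated in full; the proofs are below) =====
def Claim_equal_group_related_steps : Prop := ∀ (steps : List (List (String × String))), Dom_group_related_steps steps → Pre_group_related_steps steps → Spec_group_related_steps steps (group_related_steps steps)

-- ===== LEMMAS AND PROOFS =====

-- A's loop with its final append, as a function of the two accumulators
def pvFinal (groups : List (List (List (String × String)))) (current : List (List (String × String)))
    (rest : List (List (String × String))) : List (List (List (String × String))) :=
  let st := rest.foldl
    (fun (st : List (List (List (String × String))) × List (List (String × String))) s =>
      if pvContStep s then (st.1, st.2 ++ [s]) else (st.1 ++ [st.2], [s]))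
    (groups, current)
  st.1 ++ [st.2]

theorem pvFinal_cons (groups : List (List (List (String × String))))
    (current : List (List (String × String))) (s : List (String × String))
    (rs : List (List (String × String))) :
    pvFinal groups current (s :: rs) =
      if pvContStep s then pvFinal groups (current ++ [s]) rs
      else pvFinal (groups ++ [current]) [s] rs := by
  simp only [pvFinal, List.foldl_cons]
  split <;> rfl

theorem pvFinal_acc (rest : List (List (String × String)))
    (groups : List (List (List (String × String)))) (current : List (List (String × String))) :
    pvFinal groups current rest = groups ++ pvFinal [] current rest := by
  induction rest generalizing groups current with
  | nil => simp [pvFinal]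
  | cons s rs ih =>
    rw [pvFinal_cons, pvFinal_cons]
    by_cases h : pvContStep s = true
    · rw [if_pos h, if_pos h, ih]
    · rw [if_neg h, if_neg h, ih (groups ++ [current]), ih ([] ++ [current])]
      simp

theorem pvPeel_acc_aux (n : Nat) : ∀ (rest : List (List (String × String)))
    (groups : List (List (List (String × String)))), rest.length ≤ n →
    pvPeel groups rest = groups ++ pvPeel [] rest := by
  induction n with
  | zero =>
    intro rest groups h
    match rest with
    | [] => simp [pvPeel]
  | succ n ih =>
    intro rest groups h
    match rest with
    | [] => simp [pvPeel]
    | x :: xs =>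
      rw [pvPeel, pvPeel]
      have hlen : (xs.dropWhile pvContStep).length ≤ n :=
        le_trans (xs.length_dropWhile_le pvContStep) (Nat.le_of_succ_le_succ h)
      rw [ih _ _ hlen, ih _ ([] ++ [x :: xs.takeWhile pvContStep]) hlen]
      simp

theorem pvPeel_acc (rest : List (List (String × String)))
    (groups : List (List (List (String × String)))) :
    pvPeel groups rest = groups ++ pvPeel [] rest :=
  pvPeel_acc_aux rest.length rest groups le_rfl

theorem pvFinal_eq_peel (rest : List (List (String × String)))
    (current : List (List (String × String))) :
    pvFinal [] current rest =
      (current ++ rest.takeWhile pvContStep) :: pvPeel [] (rest.dropWhile pvContStep) := by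
  induction rest generalizing current with
  | nil => simp [pvFinal, pvPeel]
  | cons s rs ih =>
    rw [pvFinal_cons]
    by_cases h : pvContStep s = true
    · rw [if_pos h, ih]
      simp [h]
    · rw [if_neg h]
      simp only [List.nil_append]
      rw [pvFinal_acc, ih]
      rw [show (s :: rs).dropWhile pvContStep = s :: rs from by simp [h]]
      conv_rhs => rw [pvPeel]
      rw [pvPeel_acc (rs.dropWhile pvContStep) ([] ++ [s :: rs.takeWhile pvContStep])]
      simp [h]

-- ===== VERDICT (by name: the statement is the Claim_ definition above) =====
theorem group_related_steps_spec : Claim_equal_group_related_steps := by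
  intro steps _ _
  unfold Spec_group_related_steps
  match steps with
  | [] => simp [group_related_steps, group_related_steps_alt, pvPeel]
  | s0 :: rest =>
    show pvFinal [] [s0] rest = group_related_steps_alt (s0 :: rest)
    rw [pvFinal_eq_peel]
    unfold group_related_steps_alt
    conv_rhs => rw [pvPeel]
    rw [pvPeel_acc (rest.dropWhile pvContStep) ([] ++ [s0 :: rest.takeWhile pvContStep])]
    simp
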